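-- pv_equiv track=rewrite | github.com/dor-peleg/University | First_year/Intro/Ex4/hangman.py | filter_words_list
-- ===== SOURCE A (Python) =====
-- def filter_words_list(words, pattern, wrong_guess_lst):
--     filter_words = []
--     for word in words:
--         match_word = True
--         if len(word) == len(pattern):
--             for letter in wrong_guess_lst:
--                 if letter in word:
--                     match_word = False
--             if match_word:
--                 for slot in range(len(pattern)):
--                     if pattern[slot].islower():
--                         if pattern[slot] != word[slot]:
--                             match_word = False
--                     else:
--                         if word[slot] in pattern:
--                             match_word = False
--             if match_word:
--                 filter_words.append(word)
--     return filter_words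
-- ===== SOURCE B (Python) =====
-- def filter_words_list(words, pattern, wrong_guess_lst):
--     # Criterion-major sieve: instead of testing each word against every rule,
--     # run each rule as its own filtering pass over a shrinking candidate list.
--     candidates = [w for w in words if len(w) == len(pattern)]
--     for g in wrong_guess_lst:
--         candidates = [w for w in candidates if g not in w]
--     for i, p in enumerate(pattern):
--         if p.islower():
--             candidates = [w for w in candidates if w[i] == p]
--         else:
--             candidates = [w for w in candidates if w[i] not in pattern]
--     return candidates
-- ===== Notes on version B (the rewrite author's own statement) =====
-- stated objective: alternative
-- what changed: Word-major checking (per word: flag variable, inner loops over guesses and slots) is replaced by a criterion-major sieve: one length-filter pass, then one full filtering pass over the candidate list per wrong guess and per pattern slot, each expressed as a comprehension over the shrinking list.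
import Mathlib
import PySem

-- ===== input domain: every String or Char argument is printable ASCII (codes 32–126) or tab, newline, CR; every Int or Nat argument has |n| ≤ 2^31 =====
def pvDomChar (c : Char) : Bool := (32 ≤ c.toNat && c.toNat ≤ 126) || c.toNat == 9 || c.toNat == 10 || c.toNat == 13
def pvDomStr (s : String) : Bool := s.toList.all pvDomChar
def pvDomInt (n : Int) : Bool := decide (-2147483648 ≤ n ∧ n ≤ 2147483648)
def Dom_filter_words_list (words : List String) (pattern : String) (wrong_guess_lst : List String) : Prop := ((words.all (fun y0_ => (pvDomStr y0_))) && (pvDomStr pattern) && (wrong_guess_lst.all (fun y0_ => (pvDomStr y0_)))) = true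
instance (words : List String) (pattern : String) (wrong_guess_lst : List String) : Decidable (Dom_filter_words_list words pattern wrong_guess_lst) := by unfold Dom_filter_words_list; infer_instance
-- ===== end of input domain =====

-- B replaces A's word-major check (per-word flag + inner loops) by a criterion-major sieve:
-- one filtering pass over the shrinking candidate list per rule (length, each wrong guess, each slot).
-- ===== PORT A =====
def filter_words_list (words : List String) (pattern : String) (wrong_guess_lst : List String) : List String :=
  words.foldl (fun filter_words word =>
    if PySem.Str.len word = PySem.Str.len pattern then
      let m1 : Bool := wrong_guess_lst.foldl
        (fun match_word letter => if PySem.Str.isIn letter word then false else match_word) true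
      let m2 : Bool :=
        if m1 then
          (PySem.List.pyRange 0 (PySem.Str.len pattern) 1).foldl
            (fun match_word slot =>
              -- pattern[slot], word[slot]: slot is always in range here, so the total form is exact
              let p := PySem.List.pyGetD pattern.toList slot ' '
              let w := PySem.List.pyGetD word.toList slot ' '
              if PySem.Chars.islower p then
                (if p ≠ w then false else match_word)
              else
                (if PySem.Chars.isIn [w] pattern.toList then false else match_word)) m1
        else m1
      if m2 then filter_words ++ [word] else filter_words
    else filter_words) []

-- ===== PORT B =====
def filter_words_list_alt (words : List String) (pattern : String) (wrong_guess_lst : List String) : List String :=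
  let c0 := words.filter (fun w => PySem.Str.len w == PySem.Str.len pattern)
  let c1 := wrong_guess_lst.foldl (fun cs g => cs.filter (fun w => !(PySem.Str.isIn g w))) c0
  (PySem.List.enumerate pattern.toList).foldl
    (fun cs ip =>
      if PySem.Chars.islower ip.2 then
        -- w[i]: every candidate has len(pattern), so index ip.1 is in range; getD is exact here
        cs.filter (fun w => PySem.List.pyGetD w.toList ip.1 ' ' == ip.2)
      else
        cs.filter (fun w => !(PySem.Chars.isIn [PySem.List.pyGetD w.toList ip.1 ' '] pattern.toList)))
    c1

-- ===== PRECONDITION & SPEC =====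
def Spec_filter_words_list (words : List String) (pattern : String) (wrong_guess_lst : List String) (out : List String) : Prop := out = filter_words_list_alt words pattern wrong_guess_lst
instance (words : List String) (pattern : String) (wrong_guess_lst : List String) (out : List String) : Decidable (Spec_filter_words_list words pattern wrong_guess_lst out) := by unfold Spec_filter_words_list; infer_instance

-- ===== CLAIM (what is proved, stated in full; the proofs are below) =====
def Claim_equal_filter_words_list : Prop := ∀ (words : List String) (pattern : String) (wrong_guess_lst : List String), Dom_filter_words_list words pattern wrong_guess_lst → Spec_filter_words_list words pattern wrong_guess_lst (filter_words_list words pattern wrong_guess_lst)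

-- ===== LEMMAS AND PROOFS =====

-- A's "match_word" flag fold: any loop body of the shape "if <test>: match_word = False"
-- computes the conjunction of the negated tests.
theorem flag_foldl {α : Type} (l : List α) (body : Bool → α → Bool) (q : α → Bool)
    (h : ∀ m x, body m x = if q x then false else m) (b : Bool) :
    l.foldl body b = (b && l.all (fun x => !q x)) := by
  induction l generalizing b with
  | nil => simp
  | cons x xs ih =>
    simp only [List.foldl_cons, List.all_cons, h, ih]
    cases q x <;> cases b <;> simp

-- B's sieve: a fold of filtering passes collapses to one filter over the conjunction of the rules
theorem foldl_filter_chain {α β : Type} (gs : List β) (q : β → α → Bool) (l : List α) :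
    gs.foldl (fun acc g => acc.filter (q g)) l
      = l.filter (fun w => gs.all (fun g => q g w)) := by
  induction gs generalizing l with
  | nil => simp
  | cons g gs ih =>
    simp only [List.foldl_cons, List.all_cons, ih, List.filter_filter]
    exact List.filter_congr (fun a _ => Bool.and_comm _ _)

-- A's per-word flag, written as one Bool expression
def flagA (pattern : String) (wrong_guess_lst : List String) (word : String) : Bool :=
  if PySem.Str.len word = PySem.Str.len pattern then
    let m1 : Bool := wrong_guess_lst.foldl
      (fun match_word letter => if PySem.Str.isIn letter word then false else match_word) true
    if m1 then
      (PySem.List.pyRange 0 (PySem.Str.len pattern) 1).foldl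
        (fun match_word slot =>
          let p := PySem.List.pyGetD pattern.toList slot ' '
          let w := PySem.List.pyGetD word.toList slot ' '
          if PySem.Chars.islower p then
            (if p ≠ w then false else match_word)
          else
            (if PySem.Chars.isIn [w] pattern.toList then false else match_word)) m1
    else m1
  else false

-- the per-slot rule B applies at (i, p)
def slotPred (pattern : String) (ip : Int × Char) (w : String) : Bool :=
  if PySem.Chars.islower ip.2 then PySem.List.pyGetD w.toList ip.1 ' ' == ip.2
  else !(PySem.Chars.isIn [PySem.List.pyGetD w.toList ip.1 ' '] pattern.toList)

-- pointwise: A's flag equals B's combined sieve condition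
theorem flagA_eq (pattern : String) (wrong_guess_lst : List String) (w : String) :
    flagA pattern wrong_guess_lst w
      = (((PySem.List.enumerate pattern.toList).all (fun ip => slotPred pattern ip w) &&
          wrong_guess_lst.all (fun g => !(PySem.Str.isIn g w))) &&
         (PySem.Str.len w == PySem.Str.len pattern)) := by
  unfold flagA
  by_cases hlen : PySem.Str.len w = PySem.Str.len pattern
  case neg =>
    have h2 : (PySem.Str.len w == PySem.Str.len pattern) = false := beq_eq_false_iff_ne.mpr hlen
    rw [if_neg hlen, h2, Bool.and_false]
  case pos =>
  have h2 : (PySem.Str.len w == PySem.Str.len pattern) = true := beq_iff_eq.mpr hlen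
  rw [if_pos hlen, h2, Bool.and_true,
      flag_foldl _ _ (fun letter => PySem.Str.isIn letter w) (fun _ _ => rfl), Bool.true_and]
  set m1 := wrong_guess_lst.all (fun x => !PySem.Str.isIn x w) with hm1
  cases m1
  case false => simp
  case true =>
    have hq : ∀ (m : Bool) (slot : Int),
        (let p := PySem.List.pyGetD pattern.toList slot ' '
         let wc := PySem.List.pyGetD w.toList slot ' '
         if PySem.Chars.islower p then
           (if p ≠ wc then false else m)
         else
           (if PySem.Chars.isIn [wc] pattern.toList then false else m))
        = (if (if PySem.Chars.islower (PySem.List.pyGetD pattern.toList slot ' ') then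
                 decide (PySem.List.pyGetD pattern.toList slot ' ' ≠ PySem.List.pyGetD w.toList slot ' ')
               else PySem.Chars.isIn [PySem.List.pyGetD w.toList slot ' '] pattern.toList)
           then false else m) := by
      intro m slot
      by_cases hp :
          PySem.Chars.islower (PySem.List.pyGetD pattern.toList slot ' ') = true <;>
        simp only [hp, if_true] <;> split <;> simp_all
    rw [if_pos rfl, Bool.and_true, flag_foldl _ _ _ hq true,
        Bool.true_and, PySem.List.enumerate_eq_map_pyRange pattern.toList ' ', List.all_map]
    simp only [PySem.Str.len_eq, PySem.List.len, String.length_toList]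
    refine List.all_congr rfl (fun j => ?_)
    simp only [Function.comp_def, slotPred]
    by_cases hp : PySem.Chars.islower (PySem.List.pyGetD pattern.toList j ' ') = true
    · simp only [hp, if_true]
      rw [decide_not, Bool.not_not, Bool.beq_comm]
      exact (beq_eq_decide _ _).symm
    · rw [Bool.not_eq_true] at hp
      simp only [hp, Bool.false_eq_true, if_false]

-- ===== VERDICT (by name: the statement is the Claim_ definition above) =====
theorem filter_words_list_spec : Claim_equal_filter_words_list := by
  intro words pattern wrong_guess_lst _
  unfold Spec_filter_words_list
  have hA : filter_words_list words pattern wrong_guess_lst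
      = words.filter (flagA pattern wrong_guess_lst) := by
    unfold filter_words_list
    have hbody : ∀ (acc : List String) (word : String),
        (if PySem.Str.len word = PySem.Str.len pattern then
          let m1 : Bool := wrong_guess_lst.foldl
            (fun match_word letter => if PySem.Str.isIn letter word then false else match_word) true
          let m2 : Bool :=
            if m1 then
              (PySem.List.pyRange 0 (PySem.Str.len pattern) 1).foldl
                (fun match_word slot =>
                  let p := PySem.List.pyGetD pattern.toList slot ' '
                  let w := PySem.List.pyGetD word.toList slot ' '
                  if PySem.Chars.islower p then
                    (if p ≠ w then false else match_word)
                  else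
                    (if PySem.Chars.isIn [w] pattern.toList then false else match_word)) m1
            else m1
          if m2 then acc ++ [word] else acc
        else acc)
        = (if flagA pattern wrong_guess_lst word then acc ++ [word] else acc) := by
      intro acc word
      unfold flagA
      by_cases hlen : PySem.Str.len word = PySem.Str.len pattern
      · rw [if_pos hlen, if_pos hlen]
      · rw [if_neg hlen, if_neg hlen]; simp
    rw [List.foldl_ext _ _ _ (fun a b _ => hbody a b), PySem.List.foldl_append_if_eq_filter]
    simp
  have hB : filter_words_list_alt words pattern wrong_guess_lst
      = words.filter (fun w =>
          ((PySem.List.enumerate pattern.toList).all (fun ip => slotPred pattern ip w) &&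
           wrong_guess_lst.all (fun g => !(PySem.Str.isIn g w))) &&
          (PySem.Str.len w == PySem.Str.len pattern)) := by
    unfold filter_words_list_alt
    have hBbody : ∀ (cs : List String) (ip : Int × Char),
        (if PySem.Chars.islower ip.2 then
          cs.filter (fun w => PySem.List.pyGetD w.toList ip.1 ' ' == ip.2)
        else
          cs.filter (fun w => !(PySem.Chars.isIn [PySem.List.pyGetD w.toList ip.1 ' '] pattern.toList)))
        = cs.filter (slotPred pattern ip) := by
      intro cs ip
      unfold slotPred
      split <;> rename_i h <;> simp
    rw [List.foldl_ext _ _ _ (fun a b _ => hBbody a b),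
        foldl_filter_chain, foldl_filter_chain, List.filter_filter, List.filter_filter]
  rw [hA, hB]
  exact List.filter_congr (fun w _ => flagA_eq pattern wrong_guess_lst w)
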